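-- pv_equiv track=rewrite | github.com/marcusrein/CrossFit-Warmup-Generator | appfolder/getters.py | get_reps
-- ===== SOURCE A (Python) =====
-- def get_reps(selected_movements, tough_exercises, dictionary):
--     reps_big_list = []
--     reps_chosen = []
--
--     for movement in selected_movements:
--         reps_big_list.append(dictionary.get(movement)['reps'])
--
--     if len(tough_exercises) == 0:
--         for x in reps_big_list:
--             y = x[0]
--             reps_chosen.append(y)
--     elif len(tough_exercises) == 1:
--         for x in reps_big_list:
--             y = x[1]
--             reps_chosen.append(y)
--     elif len(tough_exercises) >= 2:
--         for x in reps_big_list: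
--             y = x[2]
--             reps_chosen.append(y)
--     return reps_chosen
-- ===== SOURCE B (Python) =====
-- def get_reps(selected_movements, tough_exercises, dictionary):
--     idx = len(tough_exercises[:2])
--     if not selected_movements:
--         return []
--     head = dictionary.get(selected_movements[0])['reps'][idx]
--     return [head] + get_reps(selected_movements[1:], tough_exercises, dictionary)
-- ===== Notes on version B (the rewrite author's own statement) =====
-- stated objective: alternative
-- what changed: Replaces A's two staged passes (build reps_big_list, then an if/elif/elif cascade of indexing loops) with a head/tail structural recursion that builds the output front-to-back, clamping the index once per call via the slice length len(tough_exercises[:2]).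
import Mathlib
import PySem

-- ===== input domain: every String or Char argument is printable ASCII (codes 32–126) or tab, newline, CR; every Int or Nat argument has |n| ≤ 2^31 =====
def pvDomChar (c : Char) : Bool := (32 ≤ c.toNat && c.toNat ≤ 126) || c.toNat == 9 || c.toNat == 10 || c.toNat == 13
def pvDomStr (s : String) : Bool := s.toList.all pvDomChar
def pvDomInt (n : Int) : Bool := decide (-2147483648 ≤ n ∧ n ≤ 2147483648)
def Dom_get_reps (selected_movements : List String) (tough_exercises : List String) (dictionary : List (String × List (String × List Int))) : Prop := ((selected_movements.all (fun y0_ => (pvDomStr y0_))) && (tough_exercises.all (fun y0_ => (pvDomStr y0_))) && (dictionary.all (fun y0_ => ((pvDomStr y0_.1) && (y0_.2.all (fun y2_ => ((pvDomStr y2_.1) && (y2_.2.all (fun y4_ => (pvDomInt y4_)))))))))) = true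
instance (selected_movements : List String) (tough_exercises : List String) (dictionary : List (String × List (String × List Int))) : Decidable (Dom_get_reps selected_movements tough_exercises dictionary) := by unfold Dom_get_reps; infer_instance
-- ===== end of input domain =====

-- B replaces A's two staged passes (intermediate reps_big_list + if/elif/elif indexing loops)
-- with a head/tail structural recursion building the output front-to-back, clamping the index
-- via the slice length len(tough_exercises[:2]) (objective: alternative).

-- shared lookup helper: dictionary.get(movement)['reps'] (none where Python raises TypeError/KeyError)
def pvRepsRow (dictionary : List (String × List (String × List Int))) (movement : String) : Option (List Int) :=
  ((PySem.Dict.mk dictionary).get? movement).bind (fun inner => (PySem.Dict.mk inner).get? "reps")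

-- ===== PORT A =====
def get_reps (selected_movements : List String) (tough_exercises : List String) (dictionary : List (String × List (String × List Int))) : List Int :=
  let reps_big_list : List (List Int) :=
    selected_movements.foldl (fun acc movement => acc ++ [(pvRepsRow dictionary movement).getD []]) []
  if tough_exercises.length == 0 then
    reps_big_list.foldl (fun acc x => acc ++ [(PySem.List.pyGet? x 0).getD 0]) []
  else if tough_exercises.length == 1 then
    reps_big_list.foldl (fun acc x => acc ++ [(PySem.List.pyGet? x 1).getD 0]) []
  else
    reps_big_list.foldl (fun acc x => acc ++ [(PySem.List.pyGet? x 2).getD 0]) []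

-- ===== PORT B =====
def get_reps_alt (selected_movements : List String) (tough_exercises : List String) (dictionary : List (String × List (String × List Int))) : List Int :=
  let idx : Int := (PySem.List.slice tough_exercises none (some 2)).length
  match selected_movements with
  | [] => []
  | movement :: rest =>
      [(PySem.List.pyGet? ((pvRepsRow dictionary movement).getD []) idx).getD 0]
        ++ get_reps_alt rest tough_exercises dictionary

-- ===== PRECONDITION & SPEC =====
-- Pre_ excludes exactly the inputs where Python A raises: a movement missing from the dictionary
-- (TypeError on None['reps']), an entry without a 'reps' key (KeyError), or a reps list too short
-- for the selected index (IndexError).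
def Pre_get_reps (selected_movements : List String) (tough_exercises : List String) (dictionary : List (String × List (String × List Int))) : Prop :=
  (selected_movements.all (fun movement =>
    match pvRepsRow dictionary movement with
    | none => false
    | some reps => decide (min tough_exercises.length 2 < reps.length))) = true
instance (selected_movements : List String) (tough_exercises : List String) (dictionary : List (String × List (String × List Int))) : Decidable (Pre_get_reps selected_movements tough_exercises dictionary) := by unfold Pre_get_reps; infer_instance

def pvWitness_get_reps : List String × List String × (List (String × List (String × List Int))) :=
  (["squat", "pushup"], ["burpee"], [("squat", [("reps", [10, 8, 5])]), ("pushup", [("reps", [12, 9, 6])])])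

def Spec_get_reps (selected_movements : List String) (tough_exercises : List String) (dictionary : List (String × List (String × List Int))) (out : List Int) : Prop := out = get_reps_alt selected_movements tough_exercises dictionary
instance (selected_movements : List String) (tough_exercises : List String) (dictionary : List (String × List (String × List Int))) (out : List Int) : Decidable (Spec_get_reps selected_movements tough_exercises dictionary out) := by unfold Spec_get_reps; infer_instance

-- ===== CLAIM (what is proved, stated in full; the proofs are below) =====
def Claim_equal_get_reps : Prop := ∀ (selected_movements : List String) (tough_exercises : List String) (dictionary : List (String × List (String × List Int))), Dom_get_reps selected_movements tough_exercises dictionary → Pre_get_reps selected_movements tough_exercises dictionary → Spec_get_reps selected_movements tough_exercises dictionary (get_reps selected_movements tough_exercises dictionary)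

-- ===== LEMMAS AND PROOFS =====

-- A as a two-pass map with index i, for any fixed index i.
theorem get_reps_eq_map (selected_movements : List String) (dictionary : List (String × List (String × List Int))) (i : Int) :
    ((selected_movements.foldl (fun acc movement => acc ++ [(pvRepsRow dictionary movement).getD []]) []).foldl
       (fun acc x => acc ++ [(PySem.List.pyGet? x i).getD 0]) [])
    = selected_movements.map (fun movement =>
        (PySem.List.pyGet? ((pvRepsRow dictionary movement).getD []) i).getD 0) := by
  rw [PySem.List.foldl_append_singleton_eq_map, PySem.List.foldl_append_singleton_eq_map]
  simp [List.map_map, Function.comp]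

-- B's recursion as the same map, with i the clamped slice length.
theorem get_reps_alt_eq_map (selected_movements : List String) (tough_exercises : List String) (dictionary : List (String × List (String × List Int))) :
    get_reps_alt selected_movements tough_exercises dictionary
    = selected_movements.map (fun movement =>
        (PySem.List.pyGet? ((pvRepsRow dictionary movement).getD [])
          ((min tough_exercises.length 2 : Nat) : Int)).getD 0) := by
  induction selected_movements with
  | nil => simp [get_reps_alt]
  | cons m rest ih =>
      rw [List.map_cons, ← ih]
      show [(PySem.List.pyGet? _ ((PySem.List.slice tough_exercises none (some 2)).length : Int)).getD 0] ++ _ = _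
      have h2 : ((2 : Int)) = ((2 : Nat) : Int) := rfl
      rw [h2, PySem.List.slice_to_natCast, List.length_take]
      simp [Nat.min_comm]

-- ===== VERDICT (by name: the statement is the Claim_ definition above) =====
theorem get_reps_spec : Claim_equal_get_reps := by
  intro sm te d _ _
  unfold Spec_get_reps get_reps
  rw [get_reps_alt_eq_map]
  rcases te with _ | ⟨t, te'⟩
  · exact get_reps_eq_map sm d 0
  · rcases te' with _ | ⟨t', te''⟩
    · exact get_reps_eq_map sm d 1
    · simp only [List.length_cons]
      have h : min (te''.length + 1 + 1) 2 = 2 := by omega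
      rw [h]
      exact get_reps_eq_map sm d 2
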